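-- pv_equiv track=rewrite | github.com/zensakkour/ICPC_1 | ICPC training camp 2024/ICPCday1/a.py | count_signals
-- ===== SOURCE A (Python) =====
-- def count_signals(L):
--     MOD = 3000017
--     dp = [[0, 0] for _ in range(L + 1)]
--     dp[0][0] = 1
--
--     for i in range(L):
--         for k in range(1, L - i + 1):
--             dp[i + k][0] = (dp[i + k][0] + dp[i][0] + dp[i][1]) % MOD
--             dp[i + k][1] = (dp[i + k][1] + dp[i][0]) % MOD
--
--     return dp[L][0]
-- ===== SOURCE B (Python) =====
-- def count_signals(L):
--     MOD = 3000017
--     a, b = 1, 0        # dp[L_done] pair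
--     s0, s1 = 0, 0      # running (mod-reduced) sums of dp[i][0]+dp[i][1] and dp[i][0]
--     for _ in range(L):
--         s0 = (s0 + a + b) % MOD
--         s1 = (s1 + a) % MOD
--         a, b = s0, s1
--     return a
-- ===== Notes on version B (the rewrite author's own statement) =====
-- stated objective: faster
-- what changed: The O(L^2) range-update DP (each row i pushed into every dp[i+k]) is replaced by a single O(L) pass that maintains two running prefix-sum accumulators, since every dp[j] is just the mod-sum of all earlier rows.
import Mathlib
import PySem

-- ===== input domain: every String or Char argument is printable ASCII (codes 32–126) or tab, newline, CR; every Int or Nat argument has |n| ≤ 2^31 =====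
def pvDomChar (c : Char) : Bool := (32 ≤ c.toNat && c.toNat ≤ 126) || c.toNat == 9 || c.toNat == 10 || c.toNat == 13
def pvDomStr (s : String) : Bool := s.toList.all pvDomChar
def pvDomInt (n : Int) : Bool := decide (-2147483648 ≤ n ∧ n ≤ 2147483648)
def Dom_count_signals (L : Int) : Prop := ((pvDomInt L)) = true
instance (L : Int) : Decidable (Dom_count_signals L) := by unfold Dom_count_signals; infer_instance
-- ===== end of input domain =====

-- B replaces A's O(L^2) range-update DP by one O(L) pass with two running prefix-sum accumulators (objective: faster).

-- ===== PORT A =====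
def count_signals (L : Int) : Int :=
  let MOD : Int := 3000017
  let dp : List (Int × Int) := (PySem.List.pyRange 0 (L + 1) 1).map (fun _ => (0, 0))
  let dp := PySem.List.pySetD dp 0 (1, (PySem.List.pyGetD dp 0 ((0:Int), (0:Int))).2)  -- dp[0][0] = 1
  let dp := (PySem.List.pyRange 0 L 1).foldl (fun dp i =>
    (PySem.List.pyRange 1 (L - i + 1) 1).foldl (fun dp k =>
      -- dp[i+k][0] = (dp[i+k][0] + dp[i][0] + dp[i][1]) % MOD
      let di := PySem.List.pyGetD dp i ((0:Int), (0:Int))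
      let dj := PySem.List.pyGetD dp (i + k) ((0:Int), (0:Int))
      let dp := PySem.List.pySetD dp (i + k) (PySem.Int.mod (dj.1 + di.1 + di.2) MOD, dj.2)
      -- dp[i+k][1] = (dp[i+k][1] + dp[i][0]) % MOD
      let di := PySem.List.pyGetD dp i ((0:Int), (0:Int))
      let dj := PySem.List.pyGetD dp (i + k) ((0:Int), (0:Int))
      PySem.List.pySetD dp (i + k) (dj.1, PySem.Int.mod (dj.2 + di.1) MOD)) dp) dp
  (PySem.List.pyGetD dp L ((0:Int), (0:Int))).1

-- ===== PORT B =====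
def count_signals_alt (L : Int) : Int :=
  let st := (PySem.List.pyRange 0 L 1).foldl
    (fun (st : (Int × Int) × (Int × Int)) _ =>
      let s0' := PySem.Int.mod (st.2.1 + st.1.1 + st.1.2) 3000017
      let s1' := PySem.Int.mod (st.2.2 + st.1.1) 3000017
      ((s0', s1'), (s0', s1')))
    (((1 : Int), (0 : Int)), ((0 : Int), (0 : Int)))
  st.1.1

-- ===== PRECONDITION & SPEC =====
-- Pre_: A raises IndexError for L < 0 (dp is empty when dp[0][0] = 1 is executed).
def Pre_count_signals (L : Int) : Prop := 0 ≤ L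
instance (L : Int) : Decidable (Pre_count_signals L) := by unfold Pre_count_signals; infer_instance
def pvWitness_count_signals : Int := 3

def Spec_count_signals (L : Int) (out : Int) : Prop := out = count_signals_alt L
instance (L : Int) (out : Int) : Decidable (Spec_count_signals L out) := by unfold Spec_count_signals; infer_instance

-- ===== CLAIM (what is proved, stated in full; the proofs are below) =====
def Claim_equal_count_signals : Prop := ∀ (L : Int), Dom_count_signals L → Pre_count_signals L → Spec_count_signals L (count_signals L)

-- ===== LEMMAS AND PROOFS =====

-- B's loop body as a function of the state alone (the loop variable is unused).
def csStep (st : (Int × Int) × (Int × Int)) : (Int × Int) × (Int × Int) :=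
  let s0' := PySem.Int.mod (st.2.1 + st.1.1 + st.1.2) 3000017
  let s1' := PySem.Int.mod (st.2.2 + st.1.1) 3000017
  ((s0', s1'), (s0', s1'))

-- B's state after n iterations: .1 = (a, b), .2 = (s0, s1).
def csB : Nat → (Int × Int) × (Int × Int)
  | 0 => ((1, 0), (0, 0))
  | n + 1 => csStep (csB n)

theorem csB_fst_succ (n : Nat) : (csB (n + 1)).1 = (csB (n + 1)).2 := rfl

-- B's port is csB iterated (the loop variable is ignored).
theorem foldl_csStep (l : List Int) : ∀ (m : Nat),
    l.foldl (fun st _ => csStep st) (csB m) = csB (m + l.length) := by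
  induction l with
  | nil => intro m; simp
  | cons x xs ih =>
    intro m
    have : csStep (csB m) = csB (m + 1) := rfl
    simp only [List.foldl_cons, this, ih (m + 1), List.length_cons]
    ring_nf

theorem alt_eq_csB (L : Int) : count_signals_alt L = (csB L.toNat).1.1 := by
  show ((PySem.List.pyRange 0 L 1).foldl (fun st _ => csStep st) (csB 0)).1.1 = _
  rw [foldl_csStep, PySem.List.length_pyRange_one]
  norm_num

-- A's inner-loop body (the two assignments of A, as a function of i, dp, k).
def csInner (i : Int) (dp : List (Int × Int)) (k : Int) : List (Int × Int) :=
  let di := PySem.List.pyGetD dp i ((0:Int), (0:Int))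
  let dj := PySem.List.pyGetD dp (i + k) ((0:Int), (0:Int))
  let dp := PySem.List.pySetD dp (i + k) (PySem.Int.mod (dj.1 + di.1 + di.2) 3000017, dj.2)
  let di := PySem.List.pyGetD dp i ((0:Int), (0:Int))
  let dj := PySem.List.pyGetD dp (i + k) ((0:Int), (0:Int))
  PySem.List.pySetD dp (i + k) (dj.1, PySem.Int.mod (dj.2 + di.1) 3000017)

-- the settled prefix of A's dp after m outer iterations: dp[0] and dp[1..m]
def csPref (m : Nat) : List (Int × Int) :=
  ((1 : Int), (0 : Int)) :: (List.range m).map (fun j => (csB (j + 1)).2)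

theorem csPref_length (m : Nat) : (csPref m).length = m + 1 := by
  simp [csPref]

theorem csPref_getD (m : Nat) : (csPref m).getD m ((0:Int), (0:Int)) = (csB m).1 := by
  cases m with
  | zero => rfl
  | succ j =>
    have hj : j < ((List.range (j+1)).map (fun j => (csB (j + 1)).2)).length := by simp
    simp only [csPref, List.getD_cons_succ]
    rw [List.getD_eq_getElem _ _ hj]
    simp [csB_fst_succ]

theorem csPref_succ (m : Nat) :
    csPref (m + 1) = csPref m ++ [(csB (m + 1)).2] := by
  simp [csPref, List.range_succ]

-- One inner index update on a state 'settled prefix ++ t finished cells ++ (T-t) untouched cells'.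
theorem csInner_step (m t T : Nat) (htT : t < T) :
    csInner (m : Int)
      (csPref m ++ (List.replicate t ((csB (m+1)).2) ++ List.replicate (T - t) ((csB m).2)))
      (1 + (t : Int))
    = csPref m ++ (List.replicate (t+1) ((csB (m+1)).2) ++ List.replicate (T - (t+1)) ((csB m).2)) := by
  have hrep : List.replicate (T - t) ((csB m).2)
      = (csB m).2 :: List.replicate (T - t - 1) ((csB m).2) := by
    rw [← List.replicate_succ]; congr 1; omega
  have hidx : (m : Int) + (1 + (t : Int)) = ((m + 1 + t : Nat) : Int) := by push_cast; ring
  have hlen : m + 1 + t = (csPref m ++ List.replicate t ((csB (m+1)).2)).length + 0 := by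
    simp [csPref_length]
  have hgi : ∀ (tail : List (Int × Int)),
      PySem.List.pyGetD (csPref m ++ tail) ((m : Int)) ((0:Int), (0:Int)) = (csB m).1 := by
    intro tail
    rw [show ((m : Int)) = ((m : Nat) : Int) from rfl, PySem.List.pyGetD_natCast,
      List.getD_append _ _ _ _ (by simp [csPref_length]), csPref_getD]
  have hassoc : ∀ (x : Int × Int) (r : List (Int × Int)),
      csPref m ++ (List.replicate t ((csB (m+1)).2) ++ (x :: r))
      = (csPref m ++ List.replicate t ((csB (m+1)).2)) ++ (x :: r) := by
    intro x r; simp [List.append_assoc]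
  have hgj : ∀ (x : Int × Int) (r : List (Int × Int)),
      PySem.List.pyGetD (csPref m ++ (List.replicate t ((csB (m+1)).2) ++ (x :: r)))
        (((m + 1 + t : Nat) : Int)) ((0:Int), (0:Int)) = x := by
    intro x r
    rw [hassoc, PySem.List.pyGetD_natCast, hlen,
      List.getD_append_right _ _ _ _ (by omega)]
    simp
  have hset : ∀ (x v : Int × Int) (r : List (Int × Int)),
      PySem.List.pySetD (csPref m ++ (List.replicate t ((csB (m+1)).2) ++ (x :: r)))
        (((m + 1 + t : Nat) : Int)) v
      = csPref m ++ (List.replicate t ((csB (m+1)).2) ++ (v :: r)) := by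
    intro x v r
    rw [PySem.List.pySetD_natCast, hassoc, hassoc]
    have : m + 1 + t = (csPref m ++ List.replicate t ((csB (m+1)).2)).length := by
      simp [csPref_length]
    rw [this]
    simp
  rw [hrep]
  show csInner _ _ _ = csPref m ++ (List.replicate (t+1) ((csB (m+1)).2) ++ List.replicate (T - t - 1) ((csB m).2))
  unfold csInner
  simp only [hidx, hgi, hgj, hset]
  have hq : (csB (m+1)).2 = (PySem.Int.mod ((csB m).2.1 + (csB m).1.1 + (csB m).1.2) 3000017,
      PySem.Int.mod ((csB m).2.2 + (csB m).1.1) 3000017) := rfl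
  have hc : ∀ (x : Int × Int) (r : List (Int × Int)),
      List.replicate t x ++ x :: r = x :: (List.replicate t x ++ r) := by
    intro x r
    rw [List.append_cons, ← List.replicate_succ', List.replicate_succ, List.cons_append]
  rw [List.replicate_succ, hq]
  simp [hc]

-- The whole inner loop turns the T untouched cells into T finished cells.
theorem csInner_loop (m T : Nat) : ∀ (t : Nat), t ≤ T →
    ((List.range t).map (fun (k : Nat) => (1 : Int) + (k : Int))).foldl (csInner (m : Int))
      (csPref m ++ (List.replicate T ((csB m).2)))
    = csPref m ++ (List.replicate t ((csB (m+1)).2) ++ List.replicate (T - t) ((csB m).2)) := by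
  intro t
  induction t with
  | zero => intro _; simp
  | succ t ih =>
    intro ht
    rw [List.range_succ, List.map_append, List.foldl_append, ih (by omega)]
    simpa using csInner_step m t T (by omega)

-- A's outer-loop body.
def csOuter (L : Int) (dp : List (Int × Int)) (i : Int) : List (Int × Int) :=
  (PySem.List.pyRange 1 (L - i + 1) 1).foldl (csInner i) dp

theorem csOuter_loop (M : Nat) : ∀ (m : Nat), m ≤ M →
    ((List.range m).map (fun (k : Nat) => (0 : Int) + (k : Int))).foldl (csOuter (M : Int))
      (csPref 0 ++ List.replicate M ((csB 0).2))
    = csPref m ++ List.replicate (M - m) ((csB m).2) := by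
  intro m
  induction m with
  | zero => intro _; simp
  | succ m ih =>
    intro hm
    rw [List.range_succ, List.map_append, List.foldl_append, ih (by omega)]
    simp only [List.map_cons, List.map_nil, List.foldl_cons, List.foldl_nil, csOuter, zero_add]
    have harg : (((M : Int) - (m : Int) + 1) - 1).toNat = M - m := by omega
    rw [PySem.List.pyRange_one, harg]
    rw [csInner_loop m (M - m) (M - m) le_rfl, Nat.sub_self, csPref_succ,
      show M - m = (M - (m + 1)) + 1 by omega, List.replicate_succ]
    simp

theorem a_eq_csB (L : Int) (hL : 0 ≤ L) : count_signals L = (csB L.toNat).1.1 := by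
  obtain ⟨M, rfl⟩ : ∃ M : Nat, L = (M : Int) := ⟨L.toNat, by omega⟩
  show (PySem.List.pyGetD
      ((PySem.List.pyRange 0 (M : Int) 1).foldl (csOuter (M : Int))
        (PySem.List.pySetD
          ((PySem.List.pyRange 0 ((M : Int) + 1) 1).map (fun _ => ((0:Int), (0:Int)))) 0
          (1, (PySem.List.pyGetD
            ((PySem.List.pyRange 0 ((M : Int) + 1) 1).map (fun _ => ((0:Int), (0:Int)))) 0
            ((0:Int), (0:Int))).2)))
      (M : Int) ((0:Int), (0:Int))).1 = (csB ((M : Int)).toNat).1.1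
  have hinit : PySem.List.pySetD
      ((PySem.List.pyRange 0 ((M : Int) + 1) 1).map (fun _ => ((0:Int), (0:Int)))) 0
      (1, (PySem.List.pyGetD
        ((PySem.List.pyRange 0 ((M : Int) + 1) 1).map (fun _ => ((0:Int), (0:Int)))) 0
        ((0:Int), (0:Int))).2)
      = csPref 0 ++ List.replicate M ((csB 0).2) := by
    rw [List.map_const', PySem.List.length_pyRange_one]
    rw [show ((M : Int) + 1 - 0).toNat = M + 1 by omega]
    rw [show ((0:Int)) = ((0 : Nat) : Int) from rfl, PySem.List.pyGetD_natCast,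
      PySem.List.pySetD_natCast]
    rw [List.replicate_succ]
    rfl
  rw [hinit, PySem.List.pyRange_one]
  rw [show ((M : Int) - 0).toNat = M by omega]
  rw [csOuter_loop M M le_rfl]
  rw [show ((M : Int)) = ((M : Nat) : Int) from rfl, PySem.List.pyGetD_natCast]
  rw [List.getD_append _ _ _ _ (by simp [csPref_length]), csPref_getD]
  simp

-- ===== VERDICT (by name: the statement is the Claim_ definition above) =====
theorem count_signals_spec : Claim_equal_count_signals := by
  intro L _ hpre
  unfold Spec_count_signals
  rw [a_eq_csB L hpre, alt_eq_csB]
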